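-- pv_equiv track=rewrite | github.com/hohuyblon-stack/sea-automation-agency | dashboard/server.py | get_pipeline_stats
-- ===== SOURCE A (Python) =====
-- def get_pipeline_stats(leads: list[dict]) -> dict:
--     statuses: dict[str, int] = {}
--     for r in leads:
--         s = r.get("status", "new") or "new"
--         statuses[s] = statuses.get(s, 0) + 1
--
--     with_email = sum(1 for r in leads if r.get("email", "").strip())
--     with_phone = sum(1 for r in leads if r.get("phone", "").strip())
--
--     return {
--         "total": len(leads),
--         "new": statuses.get("new", 0),
--         "contacted": statuses.get("contacted", 0) + statuses.get("Contacted", 0),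
--         "replied": statuses.get("replied", 0) + statuses.get("Replied", 0),
--         "meeting": statuses.get("meeting", 0),
--         "won": statuses.get("won", 0),
--         "invalid": statuses.get("invalid_email", 0) + statuses.get("dead", 0),
--         "with_email": with_email,
--         "with_phone": with_phone,
--     }
-- ===== SOURCE B (Python) =====
-- def status_of(r):
--     return r.get("status", "new") or "new"
--
--
-- def get_pipeline_stats(leads: list[dict]) -> dict:
--     def count_status(names):
--         return sum(1 for r in leads if status_of(r) in names)
--
--     return {
--         "total": len(leads),
--         "new": count_status(("new",)),
--         "contacted": count_status(("contacted", "Contacted")),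
--         "replied": count_status(("replied", "Replied")),
--         "meeting": count_status(("meeting",)),
--         "won": count_status(("won",)),
--         "invalid": count_status(("invalid_email", "dead")),
--         "with_email": sum(1 for r in leads if r.get("email", "").strip()),
--         "with_phone": sum(1 for r in leads if r.get("phone", "").strip()),
--     }
-- ===== Notes on version B (the rewrite author's own statement) =====
-- stated objective: simpler
-- what changed: Dropped the intermediate status-histogram dict: each output bucket is computed by a direct membership-based count over the leads with a small status_of helper, instead of building a frequency table and summing lookups.
import Mathlib
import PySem

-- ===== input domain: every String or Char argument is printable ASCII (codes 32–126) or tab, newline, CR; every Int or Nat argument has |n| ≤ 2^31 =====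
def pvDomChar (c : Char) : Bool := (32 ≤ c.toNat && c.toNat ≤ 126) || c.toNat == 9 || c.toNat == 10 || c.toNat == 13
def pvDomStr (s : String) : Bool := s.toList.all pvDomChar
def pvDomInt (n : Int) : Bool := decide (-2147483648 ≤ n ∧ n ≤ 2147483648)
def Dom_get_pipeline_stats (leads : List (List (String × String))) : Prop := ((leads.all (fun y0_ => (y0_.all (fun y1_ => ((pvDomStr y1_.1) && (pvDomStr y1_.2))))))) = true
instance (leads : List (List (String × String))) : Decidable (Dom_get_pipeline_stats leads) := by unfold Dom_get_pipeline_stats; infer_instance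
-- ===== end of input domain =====

-- B drops A's intermediate status-histogram dict and counts each bucket by a direct membership scan (objective: simpler).

-- ===== PORT A =====
def get_pipeline_stats (leads : List (List (String × String))) : List (String × Int) :=
  let statuses : PySem.Dict String Int :=
    leads.foldl (fun d r =>
      let t := (PySem.Dict.mk r).getD "status" "new"
      let s := if t == "" then "new" else t       -- `or "new"`: falsy (empty) string becomes "new"
      d.insert s (d.getD s 0 + 1)) PySem.Dict.empty
  let with_email : Int := leads.countP (fun r => PySem.Str.strip ((PySem.Dict.mk r).getD "email" "") != "")
  let with_phone : Int := leads.countP (fun r => PySem.Str.strip ((PySem.Dict.mk r).getD "phone" "") != "")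
  [("total", (leads.length : Int)),
   ("new", statuses.getD "new" 0),
   ("contacted", statuses.getD "contacted" 0 + statuses.getD "Contacted" 0),
   ("replied", statuses.getD "replied" 0 + statuses.getD "Replied" 0),
   ("meeting", statuses.getD "meeting" 0),
   ("won", statuses.getD "won" 0),
   ("invalid", statuses.getD "invalid_email" 0 + statuses.getD "dead" 0),
   ("with_email", with_email),
   ("with_phone", with_phone)]

-- ===== PORT B =====
def status_of (r : List (String × String)) : String :=
  let t := (PySem.Dict.mk r).getD "status" "new"
  if t == "" then "new" else t                    -- `or "new"`

def count_status (leads : List (List (String × String))) (names : List String) : Int :=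
  leads.countP (fun r => names.contains (status_of r))

def get_pipeline_stats_alt (leads : List (List (String × String))) : List (String × Int) :=
  [("total", (leads.length : Int)),
   ("new", count_status leads ["new"]),
   ("contacted", count_status leads ["contacted", "Contacted"]),
   ("replied", count_status leads ["replied", "Replied"]),
   ("meeting", count_status leads ["meeting"]),
   ("won", count_status leads ["won"]),
   ("invalid", count_status leads ["invalid_email", "dead"]),
   ("with_email", (leads.countP (fun r => PySem.Str.strip ((PySem.Dict.mk r).getD "email" "") != "") : Int)),
   ("with_phone", (leads.countP (fun r => PySem.Str.strip ((PySem.Dict.mk r).getD "phone" "") != "") : Int))]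

-- ===== PRECONDITION & SPEC =====
def Spec_get_pipeline_stats (leads : List (List (String × String))) (out : List (String × Int)) : Prop := out = get_pipeline_stats_alt leads
instance (leads : List (List (String × String))) (out : List (String × Int)) : Decidable (Spec_get_pipeline_stats leads out) := by unfold Spec_get_pipeline_stats; infer_instance

-- ===== CLAIM (what is proved, stated in full; the proofs are below) =====
def Claim_equal_get_pipeline_stats : Prop := ∀ (leads : List (List (String × String))), Dom_get_pipeline_stats leads → Spec_get_pipeline_stats leads (get_pipeline_stats leads)

-- ===== LEMMAS AND PROOFS =====

-- A's histogram lookup is a count of normalized statuses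
theorem statuses_getD (leads : List (List (String × String))) (v : String) :
    (leads.foldl (fun d r =>
      let t := (PySem.Dict.mk r).getD "status" "new"
      let s := if t == "" then "new" else t
      d.insert s (d.getD s 0 + 1)) (PySem.Dict.empty : PySem.Dict String Int)).getD v 0
    = ((leads.map status_of).count v : Int) := by
  have h : leads.foldl (fun d r =>
      let t := (PySem.Dict.mk r).getD "status" "new"
      let s := if t == "" then "new" else t
      d.insert s (d.getD s 0 + 1)) (PySem.Dict.empty : PySem.Dict String Int)
      = (leads.map status_of).foldl (fun d x => d.insert x (d.getD x 0 + 1)) PySem.Dict.empty := by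
    rw [List.foldl_map]
    rfl
  rw [h, PySem.Dict.getD_foldl_insert_add_one]
  simp

-- B's single-name count is a count of normalized statuses
theorem count_one (leads : List (List (String × String))) (v : String) :
    count_status leads [v] = ((leads.map status_of).count v : Int) := by
  unfold count_status
  have hp : ∀ (x v : String), (x == v) = decide (x = v) := fun x v => by
    by_cases h : x = v <;> simp [h]
  simp [List.count_eq_countP, List.countP_map, Function.comp_def, hp]

-- splitting a disjunctive count into two counts of distinct values
theorem countP_or_ne {α : Type} (l : List α) (f : α → String) (a b : String) (h : a ≠ b) :
    l.countP (fun x => decide (f x = a) || decide (f x = b))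
      = l.countP (fun x => decide (f x = a)) + l.countP (fun x => decide (f x = b)) := by
  induction l with
  | nil => rfl
  | cons x xs ih =>
    simp only [List.countP_cons, ih]
    by_cases hfa : f x = a
    · have hfb : f x ≠ b := by rw [hfa]; exact h
      simp [hfa, h]
      omega
    · by_cases hfb : f x = b
      · simp [hfb, Ne.symm h]
        omega
      · simp [hfa, hfb]

-- B's two-name count splits into the two single counts when the names differ
theorem count_two (leads : List (List (String × String))) (a b : String) (h : a ≠ b) :
    count_status leads [a, b]
      = ((leads.map status_of).count a : Int) + ((leads.map status_of).count b : Int) := by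
  unfold count_status
  have hp : ∀ (x v : String), (x == v) = decide (x = v) := fun x v => by
    by_cases hv : x = v <;> simp [hv]
  simp only [List.count_eq_countP, List.countP_map, Function.comp_def, hp,
    List.contains_cons, List.contains_nil, Bool.or_false]
  rw [countP_or_ne leads status_of a b h]
  push_cast
  ring

-- ===== VERDICT (by name: the statement is the Claim_ definition above) =====
theorem get_pipeline_stats_spec : Claim_equal_get_pipeline_stats := by
  intro leads _
  show get_pipeline_stats leads = get_pipeline_stats_alt leads
  unfold get_pipeline_stats get_pipeline_stats_alt
  simp only [statuses_getD, count_one, count_two leads _ _ (by decide : "contacted" ≠ "Contacted"),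
    count_two leads _ _ (by decide : "replied" ≠ "Replied"),
    count_two leads _ _ (by decide : "invalid_email" ≠ "dead")]
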